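-- pv_equiv track=rewrite | github.com/VYelisieievV/Asynchronous-Backtracking | chess.py | king_rule_attack
-- ===== SOURCE A (Python) =====
-- def king_rule_attack(x, y, x_ref, y_ref, n):
--     """
--     Function to constraint a king.
--     Checks if a king figure can perform an attack move on target.
--
--     Args:
--         x (int): x coordinate of king
--         y (int): y coordinate of king
--         x_ref (int): x coordinate for target
--         y_ref (int): y coordinate for target
--         n (int): field size, unused
--
--     Returns:
--         bool: True if attack is possible, False otherwise
--     """
--
--     possible_coords = [
--         (x + 1, y + 1),
--         (x + 1, y),
--         (x + 1, y - 1),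
--         (x - 1, y + 1),
--         (x, y + 1),
--         (x, y - 1),
--         (x - 1, y - 1),
--         (x - 1, y),
--         (x, y),
--     ]
--     for x_pos, y_pos in possible_coords:
--         if x_pos == x_ref and y_pos == y_ref:
--             return True
--     return False
-- ===== SOURCE B (Python) =====
-- def king_rule_attack(x, y, x_ref, y_ref, n):
--     """Closed-form: target is attackable iff Chebyshev distance <= 1 (n unused, own square counts)."""
--     return abs(x - x_ref) <= 1 and abs(y - y_ref) <= 1
-- ===== Notes on version B (the rewrite author's own statement) =====
-- stated objective: simpler
-- what changed: Replaces the materialised list of 9 candidate squares and the scanning loop with a closed-form Chebyshev-distance predicate abs(x-x_ref)<=1 and abs(y-y_ref)<=1.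
import Mathlib
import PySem

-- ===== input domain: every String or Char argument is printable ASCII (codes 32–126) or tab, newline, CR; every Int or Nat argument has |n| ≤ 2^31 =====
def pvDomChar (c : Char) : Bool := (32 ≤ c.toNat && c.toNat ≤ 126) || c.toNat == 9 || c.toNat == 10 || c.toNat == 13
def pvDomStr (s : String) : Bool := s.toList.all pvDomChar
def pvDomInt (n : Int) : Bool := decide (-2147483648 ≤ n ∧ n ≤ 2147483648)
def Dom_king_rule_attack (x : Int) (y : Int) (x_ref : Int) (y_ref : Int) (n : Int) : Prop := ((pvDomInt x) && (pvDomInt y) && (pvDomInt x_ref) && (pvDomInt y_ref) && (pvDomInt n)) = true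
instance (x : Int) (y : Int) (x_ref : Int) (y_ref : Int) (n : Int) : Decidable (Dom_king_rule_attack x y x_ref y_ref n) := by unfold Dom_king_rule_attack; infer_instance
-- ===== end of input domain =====

-- ===== PORT A =====
-- A's for-loop with early return True
def kraLoop (cs : List (Int × Int)) (x_ref y_ref : Int) : Bool :=
  match cs with
  | [] => false
  | (xp, yp) :: rest => if xp = x_ref ∧ yp = y_ref then true else kraLoop rest x_ref y_ref

-- scan the literal list of 9 candidate squares, as A does
def king_rule_attack (x : Int) (y : Int) (x_ref : Int) (y_ref : Int) (n : Int) : Bool :=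
  let possible_coords : List (Int × Int) :=
    [(x + 1, y + 1), (x + 1, y), (x + 1, y - 1), (x - 1, y + 1),
     (x, y + 1), (x, y - 1), (x - 1, y - 1), (x - 1, y), (x, y)]
  kraLoop possible_coords x_ref y_ref

-- ===== PORT B =====
-- B: closed-form Chebyshev-distance predicate
def king_rule_attack_alt (x : Int) (y : Int) (x_ref : Int) (y_ref : Int) (n : Int) : Bool :=
  |x - x_ref| ≤ 1 ∧ |y - y_ref| ≤ 1

-- ===== PRECONDITION & SPEC =====
def Spec_king_rule_attack (x : Int) (y : Int) (x_ref : Int) (y_ref : Int) (n : Int) (out : Bool) : Prop := out = king_rule_attack_alt x y x_ref y_ref n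
instance (x : Int) (y : Int) (x_ref : Int) (y_ref : Int) (n : Int) (out : Bool) : Decidable (Spec_king_rule_attack x y x_ref y_ref n out) := by unfold Spec_king_rule_attack; infer_instance

-- ===== CLAIM (what is proved, stated in full; the proofs are below) =====
def Claim_equal_king_rule_attack : Prop := ∀ (x : Int) (y : Int) (x_ref : Int) (y_ref : Int) (n : Int), Dom_king_rule_attack x y x_ref y_ref n → Spec_king_rule_attack x y x_ref y_ref n (king_rule_attack x y x_ref y_ref n)

-- ===== LEMMAS AND PROOFS =====

-- ===== VERDICT (by name: the statement is the Claim_ definition above) =====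
theorem king_rule_attack_spec : Claim_equal_king_rule_attack := by
  intro x y x_ref y_ref n _
  unfold Spec_king_rule_attack king_rule_attack king_rule_attack_alt
  simp only [kraLoop, abs_le, decide_eq_true_eq]
  split_ifs <;> simp_all <;> omega
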